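-- pv_equiv track=rewrite | github.com/NAUSS-Projects/NAUSS-Multilingual-Threat-Aware-Training-Recommender | app/models/recommender.py | get_recommendation_summary
-- ===== SOURCE A (Python) =====
-- def get_recommendation_summary(recommendations):
--     """
--     Generate a summary of recommendations.
--
--     Args:
--         recommendations (list): List of recommendations
--
--     Returns:
--         dict: Summary statistics
--     """
--     if not recommendations:
--         return {
--             "total_recommendations": 0,
--             "subjects_with_recommendations": 0,
--             "new_courses": 0,
--             "outdated_courses": 0,
--             "new_subject_areas": 0
--         }
--
--     total_courses = 0
--     new_courses = 0
--     outdated_courses = 0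
--     new_subject_areas = 0
--
--     for rec in recommendations:
--         courses = rec.get('suggested_courses', [])
--         total_courses += len(courses)
--
--         for course in courses:
--             status = course.get('status', '')
--             if status == 'new_course':
--                 new_courses += 1
--             elif status == 'outdated_course':
--                 outdated_courses += 1
--             elif status == 'new_subject_area':
--                 new_subject_areas += 1
--
--     return {
--         "total_recommendations": total_courses,
--         "subjects_with_recommendations": len(recommendations),
--         "new_courses": new_courses,
--         "outdated_courses": outdated_courses,
--         "new_subject_areas": new_subject_areas
--     }
-- ===== SOURCE B (Python) =====
-- def get_recommendation_summary(recommendations):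
--     def count_status(wanted):
--         return sum(1 for rec in recommendations
--                      for c in rec.get('suggested_courses', [])
--                      if c.get('status', '') == wanted)
--     return {
--         "total_recommendations": sum(len(rec.get('suggested_courses', []))
--                                      for rec in recommendations),
--         "subjects_with_recommendations": len(recommendations),
--         "new_courses": count_status('new_course'),
--         "outdated_courses": count_status('outdated_course'),
--         "new_subject_areas": count_status('new_subject_area'),
--     }
-- ===== Notes on version B (the rewrite author's own statement) =====
-- stated objective: alternative
-- what changed: Replaces A's single pass with four branch-incremented counters (and the special-case empty guard) by independent staged passes: the total is a sum of list lengths and each status count is its own filtered scan.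
import Mathlib
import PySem

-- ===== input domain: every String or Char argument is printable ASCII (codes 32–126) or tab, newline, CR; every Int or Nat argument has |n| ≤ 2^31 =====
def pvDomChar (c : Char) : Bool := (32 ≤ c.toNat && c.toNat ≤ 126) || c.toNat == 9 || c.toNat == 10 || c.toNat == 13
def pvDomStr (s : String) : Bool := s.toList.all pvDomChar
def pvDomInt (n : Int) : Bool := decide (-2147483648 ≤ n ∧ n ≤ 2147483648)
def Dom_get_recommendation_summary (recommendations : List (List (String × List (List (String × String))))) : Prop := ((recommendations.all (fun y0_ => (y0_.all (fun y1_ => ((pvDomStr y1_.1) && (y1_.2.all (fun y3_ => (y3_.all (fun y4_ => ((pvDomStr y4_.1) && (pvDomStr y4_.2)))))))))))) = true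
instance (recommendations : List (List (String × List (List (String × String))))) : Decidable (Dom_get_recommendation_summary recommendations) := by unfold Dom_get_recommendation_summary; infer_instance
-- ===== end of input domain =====

-- B computes each summary field by its own independent pass (a sum of lengths for the
-- total, one filtered scan per status) instead of A's single pass with four
-- branch-incremented counters and a special-case empty guard (objective: alternative).

-- ===== PORT A =====
def get_recommendation_summary (recommendations : List (List (String × List (List (String × String))))) : List (String × Int) :=
  if recommendations = [] then
    [("total_recommendations", 0), ("subjects_with_recommendations", 0),
     ("new_courses", 0), ("outdated_courses", 0), ("new_subject_areas", 0)]
  else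
    -- state: (total_courses, new_courses, outdated_courses, new_subject_areas)
    let st := recommendations.foldl
      (fun (st : Int × Int × Int × Int) rec =>
        let courses := (PySem.Dict.mk rec).getD "suggested_courses" []
        let st := (st.1 + (courses.length : Int), st.2.1, st.2.2.1, st.2.2.2)
        courses.foldl
          (fun (t : Int × Int × Int × Int) course =>
            let status := (PySem.Dict.mk course).getD "status" ""
            if status = "new_course" then (t.1, t.2.1 + 1, t.2.2.1, t.2.2.2)
            else if status = "outdated_course" then (t.1, t.2.1, t.2.2.1 + 1, t.2.2.2)
            else if status = "new_subject_area" then (t.1, t.2.1, t.2.2.1, t.2.2.2 + 1)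
            else t) st)
      (0, 0, 0, 0)
    [("total_recommendations", st.1),
     ("subjects_with_recommendations", (recommendations.length : Int)),
     ("new_courses", st.2.1), ("outdated_courses", st.2.2.1),
     ("new_subject_areas", st.2.2.2)]

-- ===== PORT B =====
-- Source B's count_status: sum(1 for rec … for c in rec.get('suggested_courses', []) if c.get('status','') == wanted)
def pvCountStatus (recommendations : List (List (String × List (List (String × String))))) (wanted : String) : Int :=
  (((recommendations.flatMap (fun rec => (PySem.Dict.mk rec).getD "suggested_courses" [])).filter
      (fun c => (PySem.Dict.mk c).getD "status" "" = wanted)).length : Int)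

def get_recommendation_summary_alt (recommendations : List (List (String × List (List (String × String))))) : List (String × Int) :=
  [("total_recommendations",
      ((recommendations.map (fun rec => ((PySem.Dict.mk rec).getD "suggested_courses" ([] : List (List (String × String)))).length)).sum : Int)),
   ("subjects_with_recommendations", (recommendations.length : Int)),
   ("new_courses", pvCountStatus recommendations "new_course"),
   ("outdated_courses", pvCountStatus recommendations "outdated_course"),
   ("new_subject_areas", pvCountStatus recommendations "new_subject_area")]

-- ===== PRECONDITION & SPEC =====
def Spec_get_recommendation_summary (recommendations : List (List (String × List (List (String × String))))) (out : List (String × Int)) : Prop := out = get_recommendation_summary_alt recommendations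
instance (recommendations : List (List (String × List (List (String × String))))) (out : List (String × Int)) : Decidable (Spec_get_recommendation_summary recommendations out) := by unfold Spec_get_recommendation_summary; infer_instance

-- ===== CLAIM (what is proved, stated in full; the proofs are below) =====
def Claim_equal_get_recommendation_summary : Prop := ∀ (recommendations : List (List (String × List (List (String × String))))), Dom_get_recommendation_summary recommendations → Spec_get_recommendation_summary recommendations (get_recommendation_summary recommendations)

-- ===== LEMMAS AND PROOFS =====

-- A's inner loop over one course list, characterised by filtered lengths of statuses
theorem pv_inner (courses : List (List (String × String))) (t : Int × Int × Int × Int) :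
    courses.foldl
      (fun (t : Int × Int × Int × Int) course =>
        let status := (PySem.Dict.mk course).getD "status" ""
        if status = "new_course" then (t.1, t.2.1 + 1, t.2.2.1, t.2.2.2)
        else if status = "outdated_course" then (t.1, t.2.1, t.2.2.1 + 1, t.2.2.2)
        else if status = "new_subject_area" then (t.1, t.2.1, t.2.2.1, t.2.2.2 + 1)
        else t) t
    = (t.1,
       t.2.1 + ((courses.filter (fun c => (PySem.Dict.mk c).getD "status" "" = "new_course")).length : Int),
       t.2.2.1 + ((courses.filter (fun c => (PySem.Dict.mk c).getD "status" "" = "outdated_course")).length : Int),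
       t.2.2.2 + ((courses.filter (fun c => (PySem.Dict.mk c).getD "status" "" = "new_subject_area")).length : Int)) := by
  induction courses generalizing t with
  | nil => simp
  | cons c cs ih =>
    simp only [List.foldl_cons, List.filter_cons]
    by_cases h1 : (PySem.Dict.mk c).getD "status" "" = "new_course"
    · simp [h1, ih, Prod.ext_iff] <;> omega
    · by_cases h2 : (PySem.Dict.mk c).getD "status" "" = "outdated_course"
      · simp [h2, h1, ih, Prod.ext_iff] <;> omega
      · by_cases h3 : (PySem.Dict.mk c).getD "status" "" = "new_subject_area"
        · simp [h3, h1, h2, ih, Prod.ext_iff] <;> omega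
        · simp [h1, h2, h3, ih]

-- A's outer loop, characterised over the flattened course list
theorem pv_outer (recs : List (List (String × List (List (String × String))))) (st : Int × Int × Int × Int) :
    recs.foldl
      (fun (st : Int × Int × Int × Int) rec =>
        let courses := (PySem.Dict.mk rec).getD "suggested_courses" []
        let st := (st.1 + (courses.length : Int), st.2.1, st.2.2.1, st.2.2.2)
        courses.foldl
          (fun (t : Int × Int × Int × Int) course =>
            let status := (PySem.Dict.mk course).getD "status" ""
            if status = "new_course" then (t.1, t.2.1 + 1, t.2.2.1, t.2.2.2)
            else if status = "outdated_course" then (t.1, t.2.1, t.2.2.1 + 1, t.2.2.2)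
            else if status = "new_subject_area" then (t.1, t.2.1, t.2.2.1, t.2.2.2 + 1)
            else t) st) st
    = (st.1 + (((recs.flatMap (fun rec => (PySem.Dict.mk rec).getD "suggested_courses" [])).length : Int)),
       st.2.1 + pvCountStatus recs "new_course",
       st.2.2.1 + pvCountStatus recs "outdated_course",
       st.2.2.2 + pvCountStatus recs "new_subject_area") := by
  induction recs generalizing st with
  | nil => simp [pvCountStatus]
  | cons r rs ih =>
    simp only [List.foldl_cons]
    rw [pv_inner, ih]
    simp only [pvCountStatus, List.flatMap_cons, List.filter_append, List.length_append,
      Prod.ext_iff]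
    omega

theorem pv_total (recs : List (List (String × List (List (String × String))))) :
    ((recs.flatMap (fun rec => (PySem.Dict.mk rec).getD "suggested_courses" [])).length : Int)
      = ((recs.map (fun rec => ((PySem.Dict.mk rec).getD "suggested_courses" ([] : List (List (String × String)))).length)).sum : Int) := by
  rw [List.length_flatMap]

-- ===== VERDICT (by name: the statement is the Claim_ definition above) =====
theorem get_recommendation_summary_spec : Claim_equal_get_recommendation_summary := by
  intro recs _
  show get_recommendation_summary recs = get_recommendation_summary_alt recs
  unfold get_recommendation_summary get_recommendation_summary_alt
  by_cases h : recs = []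
  · subst h; decide
  · simp only [if_neg h]
    rw [pv_outer, pv_total]
    simp only [zero_add]
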